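-- pv_equiv track=rewrite | github.com/Zaskars/shewhart | shewhart_app/components/service/detectors.py | detect_trends_x
-- ===== SOURCE A (Python) =====
-- def detect_trends_x(data_points):
--     increasing_trend = 0
--     decreasing_trend = 0
--     for i in range(1, len(data_points)):
--         if data_points[i] > data_points[i - 1]:
--             increasing_trend += 1
--             decreasing_trend = 0
--         elif data_points[i] < data_points[i - 1]:
--             decreasing_trend += 1
--             increasing_trend = 0
--         else:
--             increasing_trend = 0
--             decreasing_trend = 0
--
--         if (
--             increasing_trend >= 7
--         ):  # значение 7 может быть изменено в зависимости от ваших потребностей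
--             return True, f"Increasing trend detected starting at point {i - 6}"
--         if decreasing_trend >= 7:
--             return True, f"Decreasing trend detected starting at point {i - 6}"
--
--     return False, ""
-- ===== SOURCE B (Python) =====
-- def detect_trends_x(data_points):
--     window = []
--     for i, x in enumerate(data_points):
--         window.append(x)
--         if len(window) > 8:
--             window.pop(0)
--         if len(window) == 8:
--             if all(a < b for a, b in zip(window, window[1:])):
--                 return True, f"Increasing trend detected starting at point {i - 6}"
--             if all(a > b for a, b in zip(window, window[1:])):
--                 return True, f"Decreasing trend detected starting at point {i - 6}"
--     return False, ""
-- ===== Notes on version B (the rewrite author's own statement) =====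
-- stated objective: alternative
-- what changed: B keeps a sliding window of the last 8 points (append/pop) and re-checks the whole window for strict monotonicity with all() at each step, instead of A's two incremental up/down run counters.
import Mathlib
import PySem

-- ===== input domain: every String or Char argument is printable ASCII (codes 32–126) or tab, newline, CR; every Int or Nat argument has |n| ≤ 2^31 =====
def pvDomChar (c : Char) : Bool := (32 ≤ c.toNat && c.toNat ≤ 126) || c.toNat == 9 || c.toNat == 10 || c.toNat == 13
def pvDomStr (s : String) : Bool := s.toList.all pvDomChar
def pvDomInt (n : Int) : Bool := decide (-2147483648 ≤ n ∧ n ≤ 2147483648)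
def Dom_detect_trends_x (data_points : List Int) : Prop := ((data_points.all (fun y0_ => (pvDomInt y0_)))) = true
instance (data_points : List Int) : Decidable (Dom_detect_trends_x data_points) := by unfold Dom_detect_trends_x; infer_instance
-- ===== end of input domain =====

-- B replaces A's two incremental run counters by a sliding window of the last 8 points
-- that is fully re-checked for strict monotonicity; same results (objective: alternative).

-- ===== PORT A =====
-- A: index loop over adjacent pairs keeping two trend counters, early return at 7.
def detectA_loop (prev : Int) (rest : List Int) (inc dec : Int) (i : Int) : Bool × String :=
  match rest with
  | [] => (false, "")
  | x :: xs =>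
    let inc' : Int := if x > prev then inc + 1 else 0
    let dec' : Int := if x > prev then 0 else if x < prev then dec + 1 else 0
    if inc' ≥ 7 then (true, "Increasing trend detected starting at point " ++ PySem.Int.toStr (i - 6))
    else if dec' ≥ 7 then (true, "Decreasing trend detected starting at point " ++ PySem.Int.toStr (i - 6))
    else detectA_loop x xs inc' dec' (i + 1)

def detect_trends_x (data_points : List Int) : Bool × String :=
  match data_points with
  | [] => (false, "")
  | p :: rest => detectA_loop p rest 0 0 1

-- ===== PORT B =====
-- B: sliding window of the last ≤ 8 points, fully re-checked for strict monotonicity each step.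
def detectB_loop (rest : List Int) (window : List Int) (i : Int) : Bool × String :=
  match rest with
  | [] => (false, "")
  | x :: xs =>
    let w1 := window ++ [x]                          -- window.append(x)
    let w := if 8 < w1.length then w1.tail else w1   -- if len > 8: window.pop(0)
    if w.length = 8 then
      if (w.zip (w.drop 1)).all (fun p => decide (p.1 < p.2)) then
        (true, "Increasing trend detected starting at point " ++ PySem.Int.toStr (i - 6))
      else if (w.zip (w.drop 1)).all (fun p => decide (p.2 < p.1)) then
        (true, "Decreasing trend detected starting at point " ++ PySem.Int.toStr (i - 6))
      else detectB_loop xs w (i + 1)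
    else detectB_loop xs w (i + 1)

def detect_trends_x_alt (data_points : List Int) : Bool × String :=
  detectB_loop data_points [] 0

-- ===== PRECONDITION & SPEC =====
def Spec_detect_trends_x (data_points : List Int) (out : Bool × String) : Prop := out = detect_trends_x_alt data_points
instance (data_points : List Int) (out : Bool × String) : Decidable (Spec_detect_trends_x data_points out) := by unfold Spec_detect_trends_x; infer_instance

-- ===== CLAIM (what is proved, stated in full; the proofs are below) =====
def Claim_equal_detect_trends_x : Prop := ∀ (data_points : List Int), Dom_detect_trends_x data_points → Spec_detect_trends_x data_points (detect_trends_x data_points)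

-- ===== LEMMAS AND PROOFS =====

-- runEnd f w: number of adjacent pairs in the maximal suffix of w all of whose
-- adjacent pairs (a, b) (a before b) satisfy f a b.
def runEnd (f : Int → Int → Bool) : List Int → Nat
  | [] => 0
  | [_] => 0
  | a :: b :: t =>
    if f a b ∧ runEnd f (b :: t) = (b :: t).length - 1
    then runEnd f (b :: t) + 1 else runEnd f (b :: t)

lemma runEnd_le (f : Int → Int → Bool) : ∀ w : List Int, runEnd f w ≤ w.length - 1
  | [] => by simp [runEnd]
  | [_] => by simp [runEnd]
  | a :: b :: t => by
    have ih := runEnd_le f (b :: t)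
    simp only [runEnd, List.length_cons] at *
    split_ifs with h
    · omega
    · omega

lemma runEnd_chain (f : Int → Int → Bool) :
    ∀ w : List Int, ((w.zip (w.drop 1)).all (fun p => f p.1 p.2) = true) ↔ runEnd f w = w.length - 1
  | [] => by simp [runEnd]
  | [_] => by simp [runEnd]
  | a :: b :: t => by
    have ih := runEnd_chain f (b :: t)
    have hle := runEnd_le f (b :: t)
    constructor
    · intro h
      simp only [List.drop_succ_cons, List.drop_zero, List.zip_cons_cons, List.all_cons,
        Bool.and_eq_true] at h
      obtain ⟨hf, hall⟩ := h
      have h2 := ih.mp hall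
      simp only [runEnd]
      rw [if_pos ⟨hf, h2⟩, h2]
      simp only [List.length_cons]
      omega
    · intro h
      simp only [runEnd] at h
      split_ifs at h with hc
      · obtain ⟨hf, h2⟩ := hc
        simp only [List.drop_succ_cons, List.drop_zero, List.zip_cons_cons, List.all_cons,
          Bool.and_eq_true]
        exact ⟨hf, ih.mpr h2⟩
      · exfalso
        simp only [List.length_cons] at h hle
        omega

lemma runEnd_append (f : Int → Int → Bool) :
    ∀ (w : List Int) (p x : Int), w.getLast? = some p →
      runEnd f (w ++ [x]) = if f p x then runEnd f w + 1 else 0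
  | [], p, x => by simp
  | [a], p, x => by
    intro h
    simp only [List.getLast?_singleton, Option.some.injEq] at h
    subst h
    simp [runEnd]
  | a :: b :: t, p, x => by
    intro h
    have h' : (b :: t).getLast? = some p := by
      simpa [List.getLast?_cons_cons] using h
    have ih := runEnd_append f (b :: t) p x h'
    have hle := runEnd_le f (b :: t)
    have hcons : (a :: b :: t) ++ [x] = a :: b :: (t ++ [x]) := by simp
    rw [hcons]
    show (if f a b ∧ runEnd f (b :: (t ++ [x])) = (b :: (t ++ [x])).length - 1
      then runEnd f (b :: (t ++ [x])) + 1 else runEnd f (b :: (t ++ [x])))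
      = if f p x then runEnd f (a :: b :: t) + 1 else 0
    have hbt : (b :: (t ++ [x])) = (b :: t) ++ [x] := by simp
    rw [hbt, ih]
    by_cases hpx : f p x = true
    · simp only [hpx, if_true]
      show (if f a b ∧ runEnd f (b :: t) + 1 = ((b :: t) ++ [x]).length - 1 then _ else _) = _
      have hlen : ((b :: t) ++ [x]).length - 1 = (b :: t).length := by simp
      rw [hlen]
      show (if f a b ∧ runEnd f (b :: t) + 1 = (b :: t).length then _ else _)
        = (if f a b ∧ runEnd f (b :: t) = (b :: t).length - 1
           then runEnd f (b :: t) + 1 else runEnd f (b :: t)) + 1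
      have heq : (f a b ∧ runEnd f (b :: t) + 1 = (b :: t).length) ↔
             (f a b ∧ runEnd f (b :: t) = (b :: t).length - 1) := by
        constructor <;> rintro ⟨hf, he⟩ <;> exact ⟨hf, by simp only [List.length_cons] at *; omega⟩
      split_ifs with h1 h2 h2
      · rfl
      · exact absurd (heq.mp h1) h2
      · exact absurd (heq.mpr h2) h1
      · rfl
    · simp only [Bool.not_eq_true] at hpx
      simp only [hpx, Bool.false_eq_true, if_false]
      simp

lemma runEnd_tail (f : Int → Int → Bool) :
    ∀ w : List Int, runEnd f w ≤ w.length - 2 → runEnd f w.tail = runEnd f w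
  | [] => by simp
  | [_] => by simp [runEnd]
  | a :: b :: t => by
    intro h
    show runEnd f (b :: t) = _
    simp only [runEnd] at *
    split_ifs at h ⊢ with hc
    · have := runEnd_le f (b :: t)
      simp only [List.length_cons] at *
      omega
    · rfl

lemma tail_getLast? (l : List Int) (h : 2 ≤ l.length) : l.tail.getLast? = l.getLast? := by
  match l with
  | a :: b :: t => simp [List.getLast?_cons_cons]

def fLt : Int → Int → Bool := fun a b => decide (a < b)
def fGt : Int → Int → Bool := fun a b => decide (b < a)

lemma loops_agree : ∀ (rest : List Int) (prev : Int) (w : List Int) (inc dec i : Int),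
    w.getLast? = some prev → w.length ≤ 8 →
    inc = (runEnd fLt w : Int) → dec = (runEnd fGt w : Int) →
    inc ≤ 6 → dec ≤ 6 →
    detectA_loop prev rest inc dec i = detectB_loop rest w i
  | [], prev, w, inc, dec, i => by
    intros; simp [detectA_loop, detectB_loop]
  | x :: xs, prev, w, inc, dec, i => by
    intro hlast hlen hinc hdec hinc6 hdec6
    have hw1last : (w ++ [x]).getLast? = some x := by simp
    have hA1 : runEnd fLt (w ++ [x]) = if prev < x then runEnd fLt w + 1 else 0 := by
      simpa [fLt] using runEnd_append fLt w prev x hlast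
    have hD1 : runEnd fGt (w ++ [x]) = if x < prev then runEnd fGt w + 1 else 0 := by
      simpa [fGt] using runEnd_append fGt w prev x hlast
    have hwne : w ≠ [] := by
      intro h; subst h; simp at hlast
    have hwlen1 : 1 ≤ w.length := List.length_pos_iff.mpr hwne
    set w' : List Int := if 8 < (w ++ [x]).length then (w ++ [x]).tail else (w ++ [x]) with hw'
    have hIle : runEnd fLt w ≤ 6 := by omega
    have hDle : runEnd fGt w ≤ 6 := by omega
    have hA1le : runEnd fLt (w ++ [x]) ≤ 7 := by rw [hA1]; split_ifs <;> omega
    have hD1le : runEnd fGt (w ++ [x]) ≤ 7 := by rw [hD1]; split_ifs <;> omega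
    have hA' : runEnd fLt w' = runEnd fLt (w ++ [x]) := by
      rw [hw']; split_ifs with hp
      · exact runEnd_tail fLt (w ++ [x]) (by simp at hp ⊢; omega)
      · rfl
    have hD' : runEnd fGt w' = runEnd fGt (w ++ [x]) := by
      rw [hw']; split_ifs with hp
      · exact runEnd_tail fGt (w ++ [x]) (by simp at hp ⊢; omega)
      · rfl
    have hlast' : w'.getLast? = some x := by
      rw [hw']; split_ifs with hp
      · rw [tail_getLast? _ (by simp at hp ⊢; omega)]; exact hw1last
      · exact hw1last
    have hlen' : w'.length ≤ 8 := by
      rw [hw']; split_ifs with hp <;> simp at hp ⊢ <;> omega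
    have hlenA : runEnd fLt w' ≤ w'.length - 1 := runEnd_le fLt w'
    have hlenD : runEnd fGt w' ≤ w'.length - 1 := runEnd_le fGt w'
    have hchainLt : ((w'.zip (w'.drop 1)).all (fun p => decide (p.1 < p.2)) = true)
        ↔ runEnd fLt w' = w'.length - 1 := runEnd_chain fLt w'
    have hchainGt : ((w'.zip (w'.drop 1)).all (fun p => decide (p.2 < p.1)) = true)
        ↔ runEnd fGt w' = w'.length - 1 := runEnd_chain fGt w'
    set incN : Int := if x > prev then inc + 1 else 0 with hincN
    set decN : Int := if x > prev then 0 else if x < prev then dec + 1 else 0 with hdecN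
    have hincN' : incN = (runEnd fLt w' : Int) := by
      rw [hincN, hA', hA1, hinc]
      by_cases h : prev < x <;> simp [h, gt_iff_lt]
    have hdecN' : decN = (runEnd fGt w' : Int) := by
      rw [hdecN, hD', hD1, hdec]
      by_cases h1 : prev < x
      · simp [h1, gt_iff_lt, not_lt_of_gt h1]
      · by_cases h2 : x < prev <;> simp [h1, h2, gt_iff_lt]
    show detectA_loop prev (x :: xs) inc dec i = detectB_loop (x :: xs) w i
    rw [detectA_loop, detectB_loop]
    simp only [ge_iff_le, ← hincN, ← hdecN, ← hw']
    by_cases hi7 : (7 : Int) ≤ incN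
    · have h7 : 7 ≤ runEnd fLt w' := by rw [hincN'] at hi7; exact_mod_cast hi7
      have hlen8 : w'.length = 8 := by omega
      have hchain : (w'.zip (w'.drop 1)).all (fun p => decide (p.1 < p.2)) = true := by
        rw [hchainLt, hlen8]; omega
      rw [if_pos hi7, if_pos hlen8, if_pos hchain]
    · have hle7 : runEnd fLt w' ≤ 6 := by
        rw [hincN'] at hi7; omega
      by_cases hd7 : (7 : Int) ≤ decN
      · have h7 : 7 ≤ runEnd fGt w' := by rw [hdecN'] at hd7; exact_mod_cast hd7
        have hlen8 : w'.length = 8 := by omega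
        have hchainG : (w'.zip (w'.drop 1)).all (fun p => decide (p.2 < p.1)) = true := by
          rw [hchainGt, hlen8]; omega
        have hnchainL : ¬ ((w'.zip (w'.drop 1)).all (fun p => decide (p.1 < p.2)) = true) := by
          rw [hchainLt, hlen8]; omega
        rw [if_neg hi7, if_pos hd7, if_pos hlen8, if_neg hnchainL, if_pos hchainG]
      · have hled : runEnd fGt w' ≤ 6 := by
          rw [hdecN'] at hd7; omega
        have ih := loops_agree xs x w' incN decN (i + 1) hlast' hlen' hincN' hdecN'
          (by rw [hincN']; exact_mod_cast hle7) (by rw [hdecN']; exact_mod_cast hled)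
        rw [if_neg hi7, if_neg hd7, ih]
        by_cases h8 : w'.length = 8
        · have hnchainL : ¬ ((w'.zip (w'.drop 1)).all (fun p => decide (p.1 < p.2)) = true) := by
            rw [hchainLt, h8]; omega
          have hnchainG : ¬ ((w'.zip (w'.drop 1)).all (fun p => decide (p.2 < p.1)) = true) := by
            rw [hchainGt, h8]; omega
          rw [if_pos h8, if_neg hnchainL, if_neg hnchainG]
        · rw [if_neg h8]

-- ===== VERDICT (by name: the statement is the Claim_ definition above) =====
theorem detect_trends_x_spec : Claim_equal_detect_trends_x := by
  intro data_points _
  unfold Spec_detect_trends_x detect_trends_x detect_trends_x_alt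
  match data_points with
  | [] => simp [detectB_loop]
  | p :: rest =>
    rw [detectB_loop]
    have h : ((([] : List Int) ++ [p]).length ≤ 8) := by simp
    simp only [List.nil_append, List.length_singleton]
    rw [if_neg (by norm_num), if_neg (by norm_num)]
    exact loops_agree rest p [p] 0 0 1 (by simp) (by simp) (by simp [runEnd]) (by simp [runEnd])
      (by norm_num) (by norm_num)
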